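-- pv_equiv track=rewrite | github.com/Shahid-724/learning_dsa | 16_Min_digit_sum.py | minElement
-- ===== SOURCE A (Python) =====
-- def minElement(nums: list[int]) -> int:
--
--     # Defining a function to calc digit sum
--     def digit_sum(n):
--         res = 0
--         while n:
--             res += n % 10
--             n //= 10
--         return res
--
--     # Declaring variables
--     res = float('inf')
--
--     # Iterating over nums
--     for i in nums:
--         res = min(res, digit_sum(i))
--
--     # Returning the result
--     return res
-- ===== SOURCE B (Python) =====
-- def minElement(nums: list[int]) -> int:
--     # digit sum via the decimal string representation instead of mod/floordiv arithmetic
--     return min(sum(int(c) for c in str(n)) for n in nums)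
-- ===== Notes on version B (the rewrite author's own statement) =====
-- stated objective: idiomatic
-- what changed: The arithmetic mod/floordiv digit-sum loop with a float('inf') accumulator is replaced by a one-line min over string-based digit sums (sum(int(c) for c in str(n))), extracting digits from the decimal representation instead of repeated division.
-- outside the precondition, e.g. on minElement([]): A returns inf, B raises ValueError
import Mathlib
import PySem

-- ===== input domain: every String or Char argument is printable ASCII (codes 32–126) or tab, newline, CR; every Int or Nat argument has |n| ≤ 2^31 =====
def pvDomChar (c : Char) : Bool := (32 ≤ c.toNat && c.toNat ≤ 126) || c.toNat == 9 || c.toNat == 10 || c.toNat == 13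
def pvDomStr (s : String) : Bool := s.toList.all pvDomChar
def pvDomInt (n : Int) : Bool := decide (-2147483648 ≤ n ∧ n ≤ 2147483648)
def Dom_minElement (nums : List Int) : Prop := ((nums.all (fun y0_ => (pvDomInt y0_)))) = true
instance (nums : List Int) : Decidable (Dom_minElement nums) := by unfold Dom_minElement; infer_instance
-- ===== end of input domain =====

-- ===== PORT A =====
-- B replaces A's arithmetic digit-sum loop by string-based digit extraction (idiomatic one-liner).
-- Pre_ excludes [] (A returns float('inf'), not an int) and negatives (A's while-loop never terminates).

-- A's inner 'while n: res += n % 10; n //= 10'.  The 'n ≤ 0' guard makes the port total;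
-- on n ≥ 0 (all inputs Pre_ admits) it is exactly Python's loop exit 'while n:'.
def digitSumA (n : Int) : Int :=
  if _h : n ≤ 0 then 0
  else PySem.Int.mod n 10 + digitSumA (PySem.Int.floordiv n 10)
termination_by n.toNat
decreasing_by
  have h10 : (0:Int) < 10 := by omega
  rw [PySem.Int.floordiv_eq_ediv_of_pos h10]
  omega

def minElement (nums : List Int) : Int :=
  -- res = float('inf') is modelled as 'none'; min(inf, x) = x, min(some v, x) = Lean's min
  let res : Option Int := nums.foldl
    (fun r i => some (match r with | none => digitSumA i | some v => min v (digitSumA i))) none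
  -- on Pre_ (nums ≠ []) res is always 'some'; getD 0 is reached only outside Pre_
  res.getD 0

-- ===== PORT B =====
-- sum(int(c) for c in str(n)); int(c) on a single decimal digit char is its code - 48
-- (exact on Pre_, where str(n) consists of digits only)
def digitSumStr (n : Int) : Int :=
  ((PySem.Int.toChars n).map (fun c => (c.toNat : Int) - 48)).sum

def minElement_alt (nums : List Int) : Int :=
  -- Python's min raises ValueError on an empty argument; Pre_ excludes [], getD 0 unreached there
  (PySem.List.min? (nums.map digitSumStr) (fun x => x)).getD 0

-- ===== PRECONDITION & SPEC =====
-- Pre_ excludes nums = [] (A returns float('inf'), not a value of the declared int type; B raises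
-- ValueError) and lists containing a negative number (A's inner while-loop never terminates there).
def Pre_minElement (nums : List Int) : Prop := nums ≠ [] ∧ ∀ n ∈ nums, 0 ≤ n
instance (nums : List Int) : Decidable (Pre_minElement nums) := by unfold Pre_minElement; infer_instance
def pvWitness_minElement : List Int := [123, 5, 91]

def Spec_minElement (nums : List Int) (out : Int) : Prop := out = minElement_alt nums
instance (nums : List Int) (out : Int) : Decidable (Spec_minElement nums out) := by unfold Spec_minElement; infer_instance

-- ===== CLAIM (what is proved, stated in full; the proofs are below) =====
def Claim_equal_minElement : Prop := ∀ (nums : List Int), Dom_minElement nums → Pre_minElement nums → Spec_minElement nums (minElement nums)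

-- ===== LEMMAS AND PROOFS =====

-- reference digit sum on Nat, used only by the proofs
def dsumN (n : Nat) : Nat :=
  if n = 0 then 0 else n % 10 + dsumN (n / 10)
decreasing_by exact Nat.div_lt_self (by omega) (by omega)

lemma dsumN_cast (n : Nat) (h : n ≠ 0) :
    (dsumN n : Int) = (n : Int) % 10 + (dsumN (n / 10) : Int) := by
  rw [dsumN, if_neg h]; push_cast; omega

lemma digitSumA_eq (n : Int) (h : 0 ≤ n) : digitSumA n = (dsumN n.toNat : Int) := by
  by_cases h0 : n = 0
  · subst h0; rw [digitSumA, dsumN]; simp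
    -- (both sides reduce to 0)
  · have hpos : 0 < n := lt_of_le_of_ne h (Ne.symm h0)
    rw [digitSumA]
    have h10 : (0:Int) < 10 := by omega
    rw [dif_neg (by omega)]
    rw [PySem.Int.mod_eq_emod_of_pos h10, PySem.Int.floordiv_eq_ediv_of_pos h10]
    rw [digitSumA_eq (n / 10) (by positivity)]
    have h2 : (n / 10).toNat = n.toNat / 10 := by omega
    rw [h2, dsumN_cast n.toNat (by omega)]
    omega
termination_by n.toNat
decreasing_by
  have : (0:Int) < n := lt_of_le_of_ne h (Ne.symm h0)
  omega

lemma val_digitChar (d : Nat) (hd : d < 10) :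
    ((Nat.digitChar d).toNat : Int) - 48 = (d : Int) := by
  interval_cases d <;> decide

lemma sum_toDigitsCore (f : Nat) : ∀ (n : Nat) (l : List Char), n < f →
    ((Nat.toDigitsCore 10 f n l).map (fun c => (c.toNat : Int) - 48)).sum
      = (dsumN n : Int) + (l.map (fun c => (c.toNat : Int) - 48)).sum := by
  induction f with
  | zero => intro n l h; omega
  | succ f ih =>
    intro n l h
    rw [Nat.toDigitsCore]
    by_cases hb : n / 10 = 0
    · have hn : n < 10 := by omega
      rw [if_pos hb]
      simp only [List.map_cons, List.sum_cons]
      rw [val_digitChar _ (Nat.mod_lt _ (by omega))]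
      have hz : dsumN 0 = 0 := by rw [dsumN]; simp
      by_cases h0 : n = 0
      · subst h0; rw [hz]
      · rw [dsumN_cast n h0, hb, hz]; omega
    · rw [if_neg hb]
      have hlt : n / 10 < f := by
        have := Nat.div_lt_self (Nat.pos_of_ne_zero (by omega)) (by omega : 1 < 10)
        omega
      rw [ih (n / 10) _ hlt]
      simp only [List.map_cons, List.sum_cons]
      rw [val_digitChar _ (Nat.mod_lt _ (by omega))]
      rw [dsumN_cast n (by omega)]
      push_cast; omega

lemma digitSumStr_eq (n : Int) (h : 0 ≤ n) : digitSumStr n = (dsumN n.toNat : Int) := by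
  unfold digitSumStr PySem.Int.toChars
  rw [if_neg (by omega)]
  have := sum_toDigitsCore (n.toNat + 1) n.toNat [] (by omega)
  unfold Nat.toDigits
  simpa using this

lemma digitSumStr_eq_digitSumA (n : Int) (h : 0 ≤ n) : digitSumStr n = digitSumA n := by
  rw [digitSumA_eq n h, digitSumStr_eq n h]

-- A's option-fold over t starting from 'some v' is the running min
lemma foldA_some (t : List Int) (v : Int) :
    t.foldl (fun r i => some (match r with | none => digitSumA i | some w => min w (digitSumA i)))
      (some v)
      = some ((t.map digitSumA).foldl min v) := by
  induction t generalizing v with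
  | nil => rfl
  | cons x t ih => simp [List.foldl_cons, ih]

-- ===== VERDICT (by name: the statement is the Claim_ definition above) =====
theorem minElement_spec : Claim_equal_minElement := by
  intro nums _ hpre
  obtain ⟨hne, hnn⟩ := hpre
  unfold Spec_minElement minElement minElement_alt
  cases nums with
  | nil => exact absurd rfl hne
  | cons x t =>
    simp only [List.map_cons, PySem.List.min?_id_cons, List.foldl_cons, foldA_some]
    have hmap : t.map digitSumA = t.map digitSumStr :=
      List.map_congr_left (fun a ha =>
        (digitSumStr_eq_digitSumA a (hnn a (List.mem_cons_of_mem _ ha))).symm)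
    rw [hmap, digitSumStr_eq_digitSumA x (hnn x (List.mem_cons_self))]
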